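-- pv_equiv track=rewrite | github.com/fritzwill/apriori-algorithm | apriori.py | createCandidateSet
-- ===== SOURCE A (Python) =====
-- def createCandidateSet(data):
-- 	cand = []
-- 	for row in data:
-- 		for itm in row:
-- 			if [itm] not in cand:
-- 				cand.append([itm])
-- 	cand.sort()
-- 	return list(map(frozenset,cand))
-- ===== SOURCE B (Python) =====
-- def createCandidateSet(data):
--     items = sorted(itm for row in data for itm in row)
--     out = []
--     for itm in items:
--         f = frozenset([itm])
--         if not out or out[-1] != f:
--             out.append(f)
--     return out
-- ===== Notes on version B (the rewrite author's own statement) =====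
-- stated objective: faster
-- what changed: Replaces A's quadratic dedup (a linear membership scan of the candidate list for every item, then a sort) by flatten + sort + a single adjacent-dedup pass over the sorted items.
import Mathlib
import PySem

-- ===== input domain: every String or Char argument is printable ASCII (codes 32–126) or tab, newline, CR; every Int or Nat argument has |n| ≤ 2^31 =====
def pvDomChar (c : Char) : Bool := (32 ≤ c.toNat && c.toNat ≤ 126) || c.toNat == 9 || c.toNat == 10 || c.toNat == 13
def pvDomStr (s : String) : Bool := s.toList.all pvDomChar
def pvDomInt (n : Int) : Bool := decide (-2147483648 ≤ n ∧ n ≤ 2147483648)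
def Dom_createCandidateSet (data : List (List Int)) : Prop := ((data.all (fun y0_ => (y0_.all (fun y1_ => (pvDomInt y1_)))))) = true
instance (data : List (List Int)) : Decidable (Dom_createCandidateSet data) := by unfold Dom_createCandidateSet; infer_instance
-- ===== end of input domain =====

-- B replaces A's repeated-membership-scan dedup by flatten + sort + one adjacent-dedup pass (sort-then-scan).

-- ===== PORT A =====
def createCandidateSet (data : List (List Int)) : List (List Int) :=
  let cand : List (List Int) :=
    data.foldl (fun cand row =>
      row.foldl (fun cand itm =>
        if [itm] ∈ cand then cand else cand ++ [[itm]]) cand) []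
  let cand := PySem.List.sorted cand (fun x => x)
  cand.map (fun l => PySem.Set.ofList l)

-- ===== PORT B =====
def createCandidateSet_alt (data : List (List Int)) : List (List Int) :=
  let items := PySem.List.sorted (data.flatMap (fun row => row)) (fun x => x)
  items.foldl (fun out itm =>
    let f : List Int := PySem.Set.ofList [itm]
    if out = [] ∨ PySem.List.pyGetD out (-1) [] ≠ f then out ++ [f] else out) []

-- ===== PRECONDITION & SPEC =====
def Spec_createCandidateSet (data : List (List Int)) (out : List (List Int)) : Prop := out = createCandidateSet_alt data
instance (data : List (List Int)) (out : List (List Int)) : Decidable (Spec_createCandidateSet data out) := by unfold Spec_createCandidateSet; infer_instance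

-- ===== CLAIM (what is proved, stated in full; the proofs are below) =====
def Claim_equal_createCandidateSet : Prop := ∀ (data : List (List Int)), Dom_createCandidateSet data → Spec_createCandidateSet data (createCandidateSet data)

-- ===== LEMMAS AND PROOFS =====

-- A's inner branch is exactly PySem.Set.add on the singleton.
theorem stepA_eq_add (s : List (List Int)) (x : Int) :
    (if [x] ∈ s then s else s ++ [[x]]) = PySem.Set.add s [x] := by
  by_cases h : [x] ∈ s <;> simp [PySem.Set.add, h]

-- set-of-mapped-singletons is the mapped set (the singleton map is injective)
theorem foldl_add_map_single : ∀ (l : List Int) (rs : List Int),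
    (l.map (fun x => [x])).foldl PySem.Set.add (rs.map (fun x => [x]))
      = (l.foldl PySem.Set.add rs).map (fun x => [x]) := by
  intro l
  induction l with
  | nil => intro rs; rfl
  | cons x t ih =>
    intro rs
    have hadd : PySem.Set.add (rs.map (fun x => [x])) [x]
        = (PySem.Set.add rs x).map (fun x => [x]) := by
      by_cases h : x ∈ rs <;> simp [PySem.Set.add, h, List.mem_map]
    simp only [List.map_cons, List.foldl_cons, hadd]
    exact ih (PySem.Set.add rs x)

theorem ofList_map_single (l : List Int) :
    PySem.Set.ofList (l.map (fun x => [x])) = (PySem.Set.ofList l).map (fun x => [x]) := by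
  rw [PySem.Set.ofList_eq_foldl, PySem.Set.ofList_eq_foldl]
  simpa using foldl_add_map_single l []

-- set(xs) is a sublist of xs (first occurrences, in order)
theorem ofList_sublist (xs : List Int) : (PySem.Set.ofList xs).Sublist xs := by
  induction xs with
  | nil => simp [PySem.Set.ofList_nil]
  | cons x t ih =>
    rw [PySem.Set.ofList_cons]
    exact List.Sublist.cons₂ x (List.filter_sublist.trans ih)

-- in a strictly increasing list every element is ≤ the last one
theorem mem_le_getLast : ∀ (rs : List Int), rs.Pairwise (· < ·) →
    ∀ a ∈ rs, ∀ (h : rs ≠ []), a ≤ rs.getLast h := by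
  intro rs
  induction rs with
  | nil => intro _ a ha; simp at ha
  | cons r t ih =>
    intro hp a ha h
    rcases List.mem_cons.mp ha with rfl | hat
    · cases t with
      | nil => simp
      | cons s u =>
        rw [List.getLast_cons (by simp)]
        exact le_of_lt ((List.pairwise_cons.mp hp).1 _ (List.getLast_mem _))
    · cases t with
      | nil => simp at hat
      | cons s u =>
        rw [List.getLast_cons (by simp)]
        exact ih (List.pairwise_cons.mp hp).2 a hat (by simp)

-- B's adjacent-dedup loop over a ≤-sorted list computes Set.update, mapped through singletons
theorem foldB_eq_update : ∀ (s rs : List Int),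
    (rs ++ s).Pairwise (· ≤ ·) → rs.Pairwise (· < ·) →
    s.foldl (fun out itm =>
        let f : List Int := PySem.Set.ofList [itm]
        if out = [] ∨ PySem.List.pyGetD out (-1) [] ≠ f then out ++ [f] else out)
      (rs.map (fun x => [x]))
      = (PySem.Set.update rs s).map (fun x => [x]) := by
  intro s
  induction s with
  | nil => intro rs _ _; simp [PySem.Set.update]
  | cons x t ih =>
    intro rs hle hlt
    rw [PySem.Set.update_cons, List.foldl_cons]
    cases rs with
    | nil =>
      have h := ih [x] (by simpa using hle) (by simp)
      simpa [PySem.Set.add, PySem.Set.ofList] using h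
    | cons r rs' =>
      have hne : (r :: rs').map (fun x => ([x] : List Int)) ≠ [] := by simp
      have hlast : PySem.List.pyGetD ((r :: rs').map (fun x => ([x] : List Int))) (-1) []
          = [(r :: rs').getLast (by simp)] := by
        rw [PySem.List.pyGetD_neg_one _ [] hne, List.getLast_map]
      have hcross : ∀ a ∈ r :: rs', a ≤ x := by
        intro a ha
        exact (List.pairwise_append.mp hle).2.2 a ha x (by simp)
      by_cases hx : (r :: rs').getLast (by simp) = x
      · -- last equals x: B skips; Set.add is a no-op since x ∈ rs
        have hmem : x ∈ r :: rs' := hx ▸ List.getLast_mem _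
        rw [if_neg (by push Not; exact ⟨hne, by rw [hlast, hx]; rfl⟩)]
        have hadd : PySem.Set.add (r :: rs') x = r :: rs' := by
          simp [PySem.Set.add, hmem]
        rw [hadd]
        have hsub : (r :: rs' ++ t).Sublist (r :: rs' ++ x :: t) :=
          List.Sublist.append_left (List.sublist_cons_self x t) _
        exact ih _ (hle.sublist hsub) hlt
      · -- last differs from x: B appends; x is new to rs
        have hnot : x ∉ r :: rs' := by
          intro hmem
          have h1 : x ≤ (r :: rs').getLast (by simp) :=
            mem_le_getLast _ hlt x hmem (by simp)
          have h2 : (r :: rs').getLast (by simp) ≤ x :=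
            hcross _ (List.getLast_mem _)
          exact hx (le_antisymm h2 h1)
        rw [if_pos (Or.inr (by
          rw [hlast, show PySem.Set.ofList [x] = [x] from rfl]
          simp [hx]))]
        have hadd : PySem.Set.add (r :: rs') x = (r :: rs') ++ [x] := by
          simp [PySem.Set.add, hnot]
        rw [hadd]
        have hle' : ((r :: rs' ++ [x]) ++ t).Pairwise (· ≤ ·) := by
          simpa using hle
        have hlt' : (r :: rs' ++ [x]).Pairwise (· < ·) := by
          rw [List.pairwise_append]
          refine ⟨hlt, by simp, ?_⟩
          intro a ha b hb
          rw [List.mem_singleton] at hb; subst hb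
          rcases lt_or_eq_of_le (hcross a ha) with h | rfl
          · exact h
          · exact absurd ha hnot
        have h := ih (r :: rs' ++ [x]) hle' hlt'
        simpa [PySem.Set.ofList, PySem.Set.add] using h

-- the sorted distinct elements, as A computes them and as B computes them, coincide
theorem ofList_sorted_eq (l : List Int) :
    PySem.Set.ofList (PySem.List.sorted l (fun x => x))
      = PySem.List.sorted (PySem.Set.ofList l) (fun x => x) := by
  symm
  apply PySem.List.sorted_eq_of_perm_of_pairwise_lt
  · rw [List.perm_ext_iff_of_nodup (PySem.Set.nodup_ofList _) (PySem.Set.nodup_ofList _)]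
    intro a
    rw [PySem.Set.mem_ofList, PySem.Set.mem_ofList, PySem.List.mem_sorted]
  · have hle : (PySem.Set.ofList (PySem.List.sorted l (fun x => x))).Pairwise (· ≤ ·) :=
      (PySem.List.sorted_pairwise l (fun x => x)).sublist (ofList_sublist _)
    have hne : (PySem.Set.ofList (PySem.List.sorted l (fun x => x))).Pairwise (· ≠ ·) :=
      PySem.Set.nodup_ofList _
    exact (hle.and hne).imp (fun h => lt_of_le_of_ne h.1 h.2)

-- sorting singletons of a duplicate-free list is the mapped sort of the elements
theorem sorted_map_single (S : List Int)
    (hS : (PySem.List.sorted S (fun x => x)).Pairwise (· < ·)) :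
    PySem.List.sorted (S.map (fun x => [x])) (fun x => x)
      = (PySem.List.sorted S (fun x => x)).map (fun x => ([x] : List Int)) := by
  have hperm : ((PySem.List.sorted S (fun x => x)).map (fun x => ([x] : List Int))).Perm
      (S.map (fun x => [x])) := (PySem.List.sorted_perm S (fun x => x) false).map _
  have hpair : List.Pairwise (fun a b => a < b)
      ((PySem.List.sorted S (fun x => x)).map (fun x => ([x] : List Int))) :=
    List.pairwise_map.mpr (hS.imp (fun h => List.cons_lt_cons_iff.mpr (Or.inl h)))
  have h := PySem.List.sorted_eq_of_perm_of_pairwise_lt (κ := List Int)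
    (S.map (fun x => [x])) _ (fun x => x) hperm hpair
  convert h using 2

-- ===== VERDICT (by name: the statement is the Claim_ definition above) =====
theorem createCandidateSet_spec : Claim_equal_createCandidateSet := by
  intro data _
  unfold Spec_createCandidateSet createCandidateSet createCandidateSet_alt
  have hcand : (data.foldl (fun cand row =>
        row.foldl (fun cand itm =>
          if [itm] ∈ cand then cand else cand ++ [[itm]]) cand) ([] : List (List Int)))
      = PySem.Set.ofList ((data.flatMap (fun row => row)).map (fun x => [x])) := by
    rw [PySem.Set.ofList_eq_foldl, List.foldl_map, ← List.foldl_flatMap]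
    simp only [stepA_eq_add]
  simp only [hcand]
  rw [ofList_map_single, sorted_map_single _ (PySem.List.sorted_ofList_pairwise_lt _),
      ← ofList_sorted_eq, List.map_map]
  have hofl : ((fun l => PySem.Set.ofList l) ∘ (fun x : Int => ([x] : List Int)))
      = (fun x : Int => ([x] : List Int)) := by
    funext x; rfl
  rw [hofl]
  have hB := foldB_eq_update (PySem.List.sorted (data.flatMap (fun row => row)) (fun x => x)) []
    (by simpa using PySem.List.sorted_pairwise (data.flatMap (fun row => row)) (fun x => x))
    (by simp)
  simpa [PySem.Set.update_nil_left] using hB.symm
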